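-- pv_equiv track=rewrite | github.com/luyuancpp/mmorpg | tools/data_table_exporter/migrate_xlsx.py | _find_message_groups
-- ===== SOURCE A (Python) =====
-- def _find_message_groups(
--     names: list[str],
--     structs: list[str],
--     repeated_names: set[str],
--     untagged: set[int],
-- ) -> dict[str, list[int]]:
--     """Find message groups from non-consecutive same-name columns.
--
--     Uses range-merging: each repeated name defines a [min, max] range of
--     its positions.  Overlapping ranges are merged into one message group.
--     """
--     n = len(names)
--
--     # Step 1: find [min, max] range for each repeated name
--     name_ranges: dict[str, tuple[int, int]] = {}
--     for target_name in repeated_names: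
--         positions = [i for i in range(n) if names[i] == target_name and i in untagged]
--         if len(positions) >= 2:
--             name_ranges[target_name] = (min(positions), max(positions))
--
--     if not name_ranges:
--         return {}
--
--     # Step 2: merge overlapping ranges (strict overlap, not adjacent)
--     sorted_ranges = sorted(name_ranges.values())
--     merged: list[tuple[int, int]] = []
--     cur_start, cur_end = sorted_ranges[0]
--     for start, end in sorted_ranges[1:]:
--         if start <= cur_end:          # overlapping
--             cur_end = max(cur_end, end)
--         else:
--             merged.append((cur_start, cur_end))
--             cur_start, cur_end = start, end
--     merged.append((cur_start, cur_end))
--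
--     # Step 3: for each merged range, collect untagged columns → one group
--     groups: dict[str, list[int]] = {}
--     for rng_start, rng_end in merged:
--         indices = [i for i in range(rng_start, rng_end + 1) if i in untagged]
--         col_names = [names[i] for i in indices]
--         prefix = _common_prefix_multi(col_names)
--         if not prefix:
--             prefix = col_names[0]
--         # Avoid duplicate group names
--         final_name = prefix
--         counter = 2
--         while final_name in groups:
--             final_name = f"{prefix}{counter}"
--             counter += 1
--         groups[final_name] = indices
--
--     return groups
--
-- def _common_prefix_multi(names: list[str]) -> str:
--     """Find common underscore-delimited prefix across multiple names."""
--     if not names: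
--         return ""
--     parts_list = [n.split("_") for n in names]
--     min_len = min(len(p) for p in parts_list)
--     common = []
--     for i in range(min_len):
--         vals = {p[i] for p in parts_list}
--         if len(vals) == 1:
--             common.append(vals.pop())
--         else:
--             break
--     return "_".join(common)
-- ===== SOURCE B (Python) =====
-- def _find_message_groups(
--     names: list[str],
--     structs: list[str],
--     repeated_names: set[str],
--     untagged: set[int],
-- ) -> dict[str, list[int]]:
--     """Single-pass bucketing: one scan over names collects, per repeated name,
--     (first position, last position, count) of its untagged occurrences; names
--     seen at least twice yield [min, max] ranges directly."""
--     buckets: dict[str, tuple[int, int, int]] = {}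
--     for i, nm in enumerate(names):
--         if nm in repeated_names and i in untagged:
--             if nm in buckets:
--                 lo, _, c = buckets[nm]
--                 buckets[nm] = (lo, i, c + 1)
--             else:
--                 buckets[nm] = (i, i, 1)
--     ranges = sorted((lo, hi) for (lo, hi, c) in buckets.values() if c >= 2)
--
--     # merge overlapping ranges in place: extend the last merged range or open a new one
--     merged: list[tuple[int, int]] = []
--     for s, e in ranges:
--         if merged and s <= merged[-1][1]:
--             merged[-1] = (merged[-1][0], max(merged[-1][1], e))
--         else:
--             merged.append((s, e))
--
--     groups: dict[str, list[int]] = {}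
--     for s, e in merged:
--         indices = sorted(i for i in untagged if s <= i <= e)
--         col_names = [names[i] for i in indices]
--         prefix = _prefix_b(col_names) or col_names[0]
--         final_name = prefix
--         counter = 2
--         while final_name in groups:
--             final_name = f"{prefix}{counter}"
--             counter += 1
--         groups[final_name] = indices
--     return groups
--
--
-- def _prefix_b(col_names: list[str]) -> str:
--     """Common underscore-delimited prefix via column-wise zip."""
--     common = []
--     for col in zip(*(nm.split("_") for nm in col_names)):
--         if len(set(col)) == 1:
--             common.append(col[0])
--         else:
--             break
--     return "_".join(common)
-- ===== Notes on version B (the rewrite author's own statement) =====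
-- stated objective: faster
-- what changed: Step 1's per-repeated-name rescans of all columns (one full scan of names per name in repeated_names) are replaced by a single pass over enumerate(names) bucketing untagged positions into per-name (first, last, count) triples; range merging extends the last merged range in place instead of threading cur_start/cur_end with a trailing append (no empty-dict early return needed), group indices come from filtering the untagged set then sorting instead of scanning the whole position range, and the common prefix is computed column-wise with zip.
import Mathlib
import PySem

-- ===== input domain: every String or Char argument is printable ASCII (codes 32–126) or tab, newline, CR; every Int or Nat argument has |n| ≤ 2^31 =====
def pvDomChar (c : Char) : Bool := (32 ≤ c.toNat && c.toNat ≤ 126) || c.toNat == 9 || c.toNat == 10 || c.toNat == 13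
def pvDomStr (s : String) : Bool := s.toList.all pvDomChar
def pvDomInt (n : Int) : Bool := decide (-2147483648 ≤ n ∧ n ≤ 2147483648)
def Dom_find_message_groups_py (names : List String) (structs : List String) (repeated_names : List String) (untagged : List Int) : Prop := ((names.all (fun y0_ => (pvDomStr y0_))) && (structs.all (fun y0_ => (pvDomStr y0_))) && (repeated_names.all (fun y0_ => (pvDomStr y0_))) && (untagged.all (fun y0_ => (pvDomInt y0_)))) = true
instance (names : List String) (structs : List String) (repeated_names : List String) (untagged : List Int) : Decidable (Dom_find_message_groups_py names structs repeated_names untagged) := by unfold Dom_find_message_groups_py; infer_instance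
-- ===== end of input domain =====

-- B replaces A's per-repeated-name rescans of all columns by one bucketing pass over
-- enumerate(names) (objective: faster; a timing run measures the speed-up).

-- ===== PORT A =====

-- the `while final_name in groups` loop shared by both Pythons; fuel g.size + 1 suffices
-- (the candidate names prefix, prefix2, prefix3, … are pairwise distinct, at most g.size are keys)
def freshNameGo (g : PySem.Dict String (List Int)) (pfx : String) : Nat → String → Int → String
  | 0, cand, _ => cand
  | fuel + 1, cand, counter =>
    if g.contains cand then freshNameGo g pfx fuel (pfx ++ PySem.Int.toStr counter) (counter + 1)
    else cand

def freshName (g : PySem.Dict String (List Int)) (pfx : String) : String :=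
  freshNameGo g pfx (g.size + 1) pfx 2

-- loop `for i in range(min_len)` of _common_prefix_multi, with its early break;
-- vals.pop() on the singleton set is its unique element, the head
def cpLoopA (parts : List (List String)) : List Int → List String → List String
  | [], common => common
  | i :: rest, common =>
    let vals := PySem.Set.ofList (parts.map (fun p => PySem.List.pyGetD p i ""))
    if vals.length = 1 then cpLoopA parts rest (common ++ [vals.headD ""]) else common

def commonPrefixMultiA (names : List String) : String :=
  if names.isEmpty then "" else
  let parts_list := names.map (fun nm => (PySem.Str.split? nm "_").getD [])  -- sep "_" ≠ "": split? is always some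
  -- min(...) over a nonempty list; the .getD 0 default is unreachable since names ≠ []
  let min_len : Int := (PySem.List.min? (parts_list.map (fun p => (p.length : Int))) (fun x => x)).getD 0
  PySem.Str.join "_" (cpLoopA parts_list (PySem.List.pyRange 0 min_len 1) [])

-- step 3 body of A; col_names[0] is headD "" (indices is never empty when this runs)
def groupStepA (names : List String) (untagged : List Int)
    (g : PySem.Dict String (List Int)) (r : Int × Int) : PySem.Dict String (List Int) :=
  let indices := (PySem.List.pyRange r.1 (r.2 + 1) 1).filter (fun i => untagged.contains i)
  let col_names := indices.map (fun i => PySem.List.pyGetD names i "")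
  let pfx0 := commonPrefixMultiA col_names
  let pfx := if pfx0 = "" then col_names.headD "" else pfx0
  g.insert (freshName g pfx) indices

def find_message_groups_py (names : List String) (structs : List String) (repeated_names : List String) (untagged : List Int) : List (String × List Int) :=
  let n : Int := names.length
  let name_ranges : PySem.Dict String (Int × Int) :=
    repeated_names.foldl (fun d t =>
      let positions := (PySem.List.pyRange 0 n 1).filter
        (fun i => PySem.List.pyGetD names i "" == t && untagged.contains i)
      if 2 ≤ positions.length then
        d.insert t ((PySem.List.min? positions (fun x => x)).getD 0,
                    (PySem.List.max? positions (fun x => x)).getD 0)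
      else d) PySem.Dict.empty
  if name_ranges.items.isEmpty then [] else
  match PySem.List.sorted2 name_ranges.values (fun p => p.1) (fun p => p.2) with
  | [] => []   -- unreachable: name_ranges is nonempty here
  | (cs, ce) :: tl =>
    let st := tl.foldl (fun (st : List (Int × Int) × Int × Int) p =>
      if p.1 ≤ st.2.2 then (st.1, st.2.1, max st.2.2 p.2)
      else (st.1 ++ [(st.2.1, st.2.2)], p.1, p.2)) ([], cs, ce)
    let merged := st.1 ++ [(st.2.1, st.2.2)]
    (merged.foldl (groupStepA names untagged) PySem.Dict.empty).items

-- ===== PORT B =====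

-- zip(*(nm.split("_") for nm in col_names)): the columns, up to the shortest row
def colsB : List (List String) → List (List String)
  | [] => []
  | l :: ls =>
    if (l :: ls).any (fun c => c.isEmpty) then []
    else (l.headD "" :: ls.map (fun c => c.headD "")) :: colsB (l.tail :: ls.map (fun c => c.tail))
  termination_by ls => (ls.headD []).length
  decreasing_by
    simp only [List.headD_cons]
    rename_i h
    simp only [List.any_cons, Bool.or_eq_true, List.any_eq_true, not_or] at h
    cases l with
    | nil => simp at h
    | cons a as => simp [List.tail_cons]

-- B's prefix loop over the columns, with its early break
def cpColsB : List (List String) → List String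
  | [] => []
  | col :: rest =>
    if (PySem.Set.ofList col).length = 1 then col.headD "" :: cpColsB rest else []

def prefixB (col_names : List String) : String :=
  PySem.Str.join "_" (cpColsB (colsB (col_names.map (fun nm => (PySem.Str.split? nm "_").getD []))))

-- step 3 body of B: indices from the untagged set, sorted; col_names[0] is headD ""
def groupStepB (names : List String) (untagged : List Int)
    (g : PySem.Dict String (List Int)) (r : Int × Int) : PySem.Dict String (List Int) :=
  let indices := PySem.List.sorted ((PySem.Set.ofList untagged).filter
      (fun i => decide (r.1 ≤ i) && decide (i ≤ r.2))) (fun x => x)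
  let col_names := indices.map (fun i => PySem.List.pyGetD names i "")
  let pfx0 := prefixB col_names
  let pfx := if pfx0 = "" then col_names.headD "" else pfx0
  g.insert (freshName g pfx) indices

def find_message_groups_py_alt (names : List String) (structs : List String) (repeated_names : List String) (untagged : List Int) : List (String × List Int) :=
  let buckets : PySem.Dict String (Int × Int × Int) :=
    (PySem.List.enumerate names 0).foldl (fun d p =>
      if repeated_names.contains p.2 && untagged.contains p.1 then
        match d.get? p.2 with
        | some v => d.insert p.2 (v.1, p.1, v.2.2 + 1)
        | none => d.insert p.2 (p.1, p.1, 1)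
      else d) PySem.Dict.empty
  let ranges := PySem.List.sorted2
      ((buckets.values.filter (fun v => 2 ≤ v.2.2)).map (fun v => (v.1, v.2.1)))
      (fun p => p.1) (fun p => p.2)
  let merged := ranges.foldl (fun (acc : List (Int × Int)) p =>
      match acc.getLast? with
      | some q => if p.1 ≤ q.2 then acc.dropLast ++ [(q.1, max q.2 p.2)] else acc ++ [p]
      | none => [p]) []
  (merged.foldl (groupStepB names untagged) PySem.Dict.empty).items

-- ===== PRECONDITION & SPEC =====
def Spec_find_message_groups_py (names : List String) (structs : List String) (repeated_names : List String) (untagged : List Int) (out : List (String × List Int)) : Prop := out = find_message_groups_py_alt names structs repeated_names untagged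
instance (names : List String) (structs : List String) (repeated_names : List String) (untagged : List Int) (out : List (String × List Int)) : Decidable (Spec_find_message_groups_py names structs repeated_names untagged out) := by unfold Spec_find_message_groups_py; infer_instance

-- ===== CLAIM (what is proved, stated in full; the proofs are below) =====
def Claim_equal_find_message_groups_py : Prop := ∀ (names : List String) (structs : List String) (repeated_names : List String) (untagged : List Int), Dom_find_message_groups_py names structs repeated_names untagged → Spec_find_message_groups_py names structs repeated_names untagged (find_message_groups_py names structs repeated_names untagged)

-- ===== LEMMAS AND PROOFS =====

-- ---------- shared vocabulary ----------

/-- positions of the untagged occurrences of `t`, exactly step 1's list comprehension -/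
def posOf (names : List String) (untagged : List Int) (t : String) : List Int :=
  (PySem.List.pyRange 0 (names.length : Int) 1).filter
    (fun i => PySem.List.pyGetD names i "" == t && untagged.contains i)

/-- the (min, max) pair A stores for a qualifying name -/
def gpA (names : List String) (untagged : List Int) (t : String) : Int × Int :=
  ((PySem.List.min? (posOf names untagged t) (fun x => x)).getD 0,
   (PySem.List.max? (posOf names untagged t) (fun x => x)).getD 0)

lemma posOf_pairwise (names : List String) (untagged : List Int) (t : String) :
    (posOf names untagged t).Pairwise (· < ·) :=
  (PySem.List.pairwise_lt_pyRange_one 0 (names.length : Int)).filter _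

lemma mem_posOf {names : List String} {untagged : List Int} {t : String} {i : Int}
    (h : i ∈ posOf names untagged t) : PySem.List.pyGetD names i "" = t := by
  have := List.of_mem_filter h
  simp only [Bool.and_eq_true, beq_iff_eq] at this
  exact this.1

-- ---------- min / max of a strictly increasing list ----------

lemma foldl_min_of_le {x : Int} {t : List Int} (h : ∀ y ∈ t, x ≤ y) : t.foldl min x = x := by
  induction t generalizing x with
  | nil => rfl
  | cons y ys ih =>
    have hx : min x y = x := min_eq_left (h y (by simp))
    simp only [List.foldl_cons, hx]
    exact ih (fun z hz => h z (by simp [hz]))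

lemma foldl_max_getLast {x : Int} {t : List Int} (h : List.Pairwise (· < ·) (x :: t)) :
    t.foldl max x = (x :: t).getLastD 0 := by
  induction t generalizing x with
  | nil => rfl
  | cons y ys ih =>
    have hxy : x < y := (List.pairwise_cons.mp h).1 y (by simp)
    have h' : List.Pairwise (· < ·) (y :: ys) := (List.pairwise_cons.mp h).2
    simp only [List.foldl_cons, max_eq_right hxy.le]
    simpa using ih h'

lemma min?_of_pairwise {l : List Int} (h : l.Pairwise (· < ·)) (hne : l ≠ []) :
    (PySem.List.min? l (fun x => x)).getD 0 = l.headD 0 := by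
  cases l with
  | nil => exact absurd rfl hne
  | cons x t =>
    rw [PySem.List.min?_id_cons]
    have : t.foldl min x = x :=
      foldl_min_of_le (fun y hy => le_of_lt ((List.pairwise_cons.mp h).1 y hy))
    simp [this]

lemma max?_of_pairwise {l : List Int} (h : l.Pairwise (· < ·)) (hne : l ≠ []) :
    (PySem.List.max? l (fun x => x)).getD 0 = l.getLastD 0 := by
  cases l with
  | nil => exact absurd rfl hne
  | cons x t =>
    rw [PySem.List.max?_id_cons]
    simp [foldl_max_getLast h]

-- ---------- A's step-1 dictionary ----------

/-- A's step-1 loop body, named for the proofs -/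
def stepA (names : List String) (untagged : List Int)
    (d : PySem.Dict String (Int × Int)) (t : String) : PySem.Dict String (Int × Int) :=
  let positions := (PySem.List.pyRange 0 (names.length : Int) 1).filter
    (fun i => PySem.List.pyGetD names i "" == t && untagged.contains i)
  if 2 ≤ positions.length then
    d.insert t ((PySem.List.min? positions (fun x => x)).getD 0,
                (PySem.List.max? positions (fun x => x)).getD 0)
  else d

lemma A_fold_get? (names : List String) (untagged : List Int) :
    ∀ (L : List String) (d : PySem.Dict String (Int × Int)) (t : String),
      (L.foldl (stepA names untagged) d).get? t =
        if t ∈ L ∧ 2 ≤ (posOf names untagged t).length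
        then some (gpA names untagged t) else d.get? t := by
  intro L
  induction L with
  | nil => intro d t; simp
  | cons u L ih =>
    intro d t
    simp only [List.foldl_cons, ih]
    by_cases hqu : 2 ≤ (posOf names untagged u).length
    · have hd : stepA names untagged d u = d.insert u (gpA names untagged u) := by
        simp only [stepA, posOf] at hqu ⊢
        rw [if_pos hqu]; rfl
      rw [hd]
      by_cases htL : t ∈ L ∧ 2 ≤ (posOf names untagged t).length
      · rw [if_pos htL, if_pos ⟨by simp [htL.1], htL.2⟩]
      · rw [if_neg htL, PySem.Dict.get?_insert]
        by_cases htu : t = u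
        · subst htu
          rw [if_pos rfl, if_pos ⟨by simp, hqu⟩]
        · rw [if_neg htu, if_neg]
          rintro ⟨hmem, hq⟩
          rcases List.mem_cons.mp hmem with h | h
          · exact htu h
          · exact htL ⟨h, hq⟩
    · have hd : stepA names untagged d u = d := by
        simp only [stepA, posOf] at hqu ⊢
        rw [if_neg hqu]
      rw [hd]
      by_cases htL : t ∈ L ∧ 2 ≤ (posOf names untagged t).length
      · rw [if_pos htL, if_pos ⟨by simp [htL.1], htL.2⟩]
      · rw [if_neg htL, if_neg]
        rintro ⟨hmem, hq⟩
        rcases List.mem_cons.mp hmem with h | h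
        · subst h; exact hqu hq
        · exact htL ⟨h, hq⟩

lemma A_fold_nodup (names : List String) (untagged : List Int) :
    ∀ (L : List String) (d : PySem.Dict String (Int × Int)),
      d.keys.Nodup → (L.foldl (stepA names untagged) d).keys.Nodup := by
  intro L
  induction L with
  | nil => intro d h; exact h
  | cons u L ih =>
    intro d h
    simp only [List.foldl_cons]
    apply ih
    simp only [stepA]
    split
    · exact PySem.Dict.nodup_keys_insert _ _ _ h
    · exact h

-- ---------- B's step-1 dictionary ----------

/-- B's bucketing loop body, named for the proofs -/
def stepB (repeated_names : List String) (untagged : List Int)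
    (d : PySem.Dict String (Int × Int × Int)) (p : Int × String) :
    PySem.Dict String (Int × Int × Int) :=
  if repeated_names.contains p.2 && untagged.contains p.1 then
    match d.get? p.2 with
    | some v => d.insert p.2 (v.1, p.1, v.2.2 + 1)
    | none => d.insert p.2 (p.1, p.1, 1)
  else d

/-- the qualifying occurrences of name `t` in an enumerate-style pair list -/
def occB (repeated_names : List String) (untagged : List Int) (t : String)
    (L : List (Int × String)) : List Int :=
  (L.filter (fun p => p.2 == t && (repeated_names.contains p.2 && untagged.contains p.1))).map Prod.fst

lemma B_fold_get? (repeated_names : List String) (untagged : List Int) (t : String) :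
    ∀ (L : List (Int × String)),
      (L.foldl (stepB repeated_names untagged) PySem.Dict.empty).get? t =
        if occB repeated_names untagged t L = [] then none
        else some ((occB repeated_names untagged t L).headD 0,
                   (occB repeated_names untagged t L).getLastD 0,
                   ((occB repeated_names untagged t L).length : Int)) := by
  intro L
  induction L using List.reverseRecOn with
  | nil => simp [occB]
  | append_singleton L p ih =>
    rw [List.foldl_append, List.foldl_cons, List.foldl_nil]
    by_cases hc : (repeated_names.contains p.2 && untagged.contains p.1) = true
    · have hr : p.2 ∈ repeated_names := by
        have := (Bool.and_eq_true _ _).mp hc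
        simpa using this.1
      have hu : p.1 ∈ untagged := by
        have := (Bool.and_eq_true _ _).mp hc
        simpa using this.2
      by_cases hpt : p.2 = t
      · have hone : (List.filter (fun q : Int × String =>
              q.2 == t && (repeated_names.contains q.2 && untagged.contains q.1)) [p]) = [p] := by
          simp [hpt, hu]
          exact hpt ▸ hr
        have hocc : occB repeated_names untagged t (L ++ [p])
            = occB repeated_names untagged t L ++ [p.1] := by
          rw [occB, occB, List.filter_append, hone, List.map_append]
          simp
        have hstep : stepB repeated_names untagged
            (L.foldl (stepB repeated_names untagged) PySem.Dict.empty) p =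
            (match (L.foldl (stepB repeated_names untagged) PySem.Dict.empty).get? p.2 with
             | some v => (L.foldl (stepB repeated_names untagged) PySem.Dict.empty).insert p.2 (v.1, p.1, v.2.2 + 1)
             | none => (L.foldl (stepB repeated_names untagged) PySem.Dict.empty).insert p.2 (p.1, p.1, 1)) := by
          simp only [stepB, hc, if_true]
        rw [hstep, hpt, ih]
        by_cases hemp : occB repeated_names untagged t L = []
        · rw [if_pos hemp]
          simp [hocc, hemp]
        · rw [if_neg hemp]
          rcases List.exists_cons_of_ne_nil hemp with ⟨x, xs, hx⟩
          simp [hocc, hx]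
          rw [show x :: (xs ++ [p.1]) = (x :: xs) ++ [p.1] from rfl, List.getLast?_concat]
          rfl
      · have hocc : occB repeated_names untagged t (L ++ [p])
            = occB repeated_names untagged t L := by
          simp [occB, List.filter_append, hpt]
        have hstep : ∀ d : PySem.Dict String (Int × Int × Int),
            (stepB repeated_names untagged d p).get? t = d.get? t := by
          intro d
          simp only [stepB, hc, if_true]
          have hne : t ≠ p.2 := fun h => hpt h.symm
          cases d.get? p.2 <;> simp [PySem.Dict.get?_insert, hne]
        rw [hstep, hocc, ih]
    · have hcf : (repeated_names.contains p.2 && untagged.contains p.1) = false :=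
        Bool.eq_false_iff.mpr hc
      have hnil : (List.filter (fun q : Int × String =>
            q.2 == t && (repeated_names.contains q.2 && untagged.contains q.1)) [p]) = [] := by
        have hpf : (p.2 == t && (repeated_names.contains p.2 && untagged.contains p.1)) = false := by
          rw [hcf]; simp
        simp only [List.filter_cons, hpf, List.filter_nil]
        simp
      have hocc : occB repeated_names untagged t (L ++ [p])
          = occB repeated_names untagged t L := by
        rw [occB, occB, List.filter_append, hnil]
        simp
      have hstep : stepB repeated_names untagged
          (L.foldl (stepB repeated_names untagged) PySem.Dict.empty) p
          = L.foldl (stepB repeated_names untagged) PySem.Dict.empty := by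
        simp only [stepB]
        rw [hcf]
        simp
      rw [hstep, hocc, ih]

lemma B_fold_nodup (repeated_names : List String) (untagged : List Int) :
    ∀ (L : List (Int × String)) (d : PySem.Dict String (Int × Int × Int)),
      d.keys.Nodup → (L.foldl (stepB repeated_names untagged) d).keys.Nodup := by
  intro L
  induction L with
  | nil => intro d h; exact h
  | cons p L ih =>
    intro d h
    simp only [List.foldl_cons]
    apply ih
    simp only [stepB]
    split
    · split
      · exact PySem.Dict.nodup_keys_insert _ _ _ h
      · exact PySem.Dict.nodup_keys_insert _ _ _ h
    · exact h

-- ---------- occB over enumerate is posOf ----------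

lemma occB_enumerate (names : List String) (repeated_names : List String) (untagged : List Int)
    (t : String) (hrep : repeated_names.contains t = true) :
    occB repeated_names untagged t (PySem.List.enumerate names) = posOf names untagged t := by
  have hr' : t ∈ repeated_names := by simpa using hrep
  have hlen : PySem.List.len names = (names.length : Int) := by simp [PySem.List.len]
  rw [occB, PySem.List.enumerate_eq_map_pyRange names "", hlen, List.filter_map, List.map_map]
  have hcong : List.filter ((fun p : Int × String =>
        p.2 == t && (repeated_names.contains p.2 && untagged.contains p.1)) ∘
        (fun j => (j, PySem.List.pyGetD names j "")))
        (PySem.List.pyRange 0 (names.length : Int) 1)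
      = List.filter (fun i => PySem.List.pyGetD names i "" == t && untagged.contains i)
        (PySem.List.pyRange 0 (names.length : Int) 1) := by
    apply List.filter_congr
    intro i _
    simp only [Function.comp_apply]
    by_cases ht : PySem.List.pyGetD names i "" = t
    · simp [ht, hr']
    · have hf : (PySem.List.pyGetD names i "" == t) = false := by simp [ht]
      rw [hf]
      simp
  rw [hcong]
  unfold posOf
  rw [show (Prod.fst ∘ fun j : Int => (j, PySem.List.pyGetD names j "")) = fun j : Int => j from rfl]
  exact List.map_id' _

lemma occB_of_not_rep (names : List String) (repeated_names : List String) (untagged : List Int)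
    (t : String) (hrep : repeated_names.contains t = false) :
    occB repeated_names untagged t (PySem.List.enumerate names) = [] := by
  rw [occB, List.map_eq_nil_iff, List.filter_eq_nil_iff]
  intro p _
  have hn : t ∉ repeated_names := by simpa using hrep
  by_cases ht : p.2 = t
  · simp [ht, hn]
  · simp [ht]

-- ---------- sorted2 on pairs with pairwise-distinct first components ----------

lemma insertBy_congr {α : Type} (f g : α → α → Bool) (x : α) :
    ∀ ys, (∀ y ∈ ys, f x y = g x y) → PySem.List.insertBy f x ys = PySem.List.insertBy g x ys := by
  intro ys
  induction ys with
  | nil => intro _; rfl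
  | cons y ys ih =>
    intro h
    simp only [PySem.List.insertBy]
    rw [h y (by simp)]
    by_cases hg : g x y = true
    · simp [hg]
    · simp only [Bool.not_eq_true] at hg
      simp [hg]
      exact ih (fun z hz => h z (by simp [hz]))

lemma foldl_insertBy_congr {α : Type} (f g : α → α → Bool) :
    ∀ (xs acc : List α),
      (∀ a b, (a ∈ xs ∨ a ∈ acc) → (b ∈ xs ∨ b ∈ acc) → f a b = g a b) →
      xs.foldl (fun acc x => PySem.List.insertBy f x acc) acc
        = xs.foldl (fun acc x => PySem.List.insertBy g x acc) acc := by
  intro xs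
  induction xs with
  | nil => intro acc _; rfl
  | cons x xs ih =>
    intro acc h
    simp only [List.foldl_cons]
    rw [insertBy_congr f g x acc (fun y hy => h x y (Or.inl (by simp)) (Or.inr hy))]
    apply ih
    intro a b ha hb
    have hmem : ∀ c, c ∈ PySem.List.insertBy g x acc → c = x ∨ c ∈ acc :=
      fun c hc => (PySem.List.mem_insertBy g x c acc).mp hc
    apply h
    · rcases ha with ha | ha
      · exact Or.inl (by simp [ha])
      · rcases hmem a ha with h1 | h1
        · exact Or.inl (by simp [h1])
        · exact Or.inr h1
    · rcases hb with hb | hb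
      · exact Or.inl (by simp [hb])
      · rcases hmem b hb with h1 | h1
        · exact Or.inl (by simp [h1])
        · exact Or.inr h1

lemma sorted2_eq_sorted_fst (xs : List (Int × Int)) (h : (xs.map Prod.fst).Nodup) :
    PySem.List.sorted2 xs (fun p => p.1) (fun p => p.2) false
      = PySem.List.sorted xs (fun p => p.1) false := by
  have hinj := List.inj_on_of_nodup_map h
  rw [PySem.List.sorted_eq_foldl_insertBy]
  show List.foldl (fun acc x => PySem.List.insertBy (fun a b =>
      decide (a.1 < b.1) || (!decide (b.1 < a.1) && decide (a.2 < b.2))) x acc) [] xs = _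
  apply foldl_insertBy_congr
  intro a b ha hb
  have ha' : a ∈ xs := by rcases ha with h | h; exact h; simp at h
  have hb' : b ∈ xs := by rcases hb with h | h; exact h; simp at h
  rcases lt_trichotomy a.1 b.1 with h1 | h1 | h1
  · simp [h1, not_lt_of_gt h1]
  · have hab : a = b := hinj ha' hb' h1
    subst hab
    simp
  · simp [h1, not_lt_of_gt h1]

lemma sorted_fst_eq_of_perm (xs ys : List (Int × Int)) (hperm : xs.Perm ys)
    (h : (xs.map Prod.fst).Nodup) :
    PySem.List.sorted xs (fun p => p.1) false = PySem.List.sorted ys (fun p => p.1) false := by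
  have hzperm : (PySem.List.sorted xs (fun p => p.1) false).Perm xs :=
    PySem.List.sorted_perm _ _ _
  have hle : (PySem.List.sorted xs (fun p => p.1) false).Pairwise (fun a b => a.1 ≤ b.1) :=
    PySem.List.sorted_pairwise _ _
  have hmapnd : ((PySem.List.sorted xs (fun p => p.1) false).map Prod.fst).Nodup :=
    (hzperm.map Prod.fst).nodup_iff.mpr h
  have hne : (PySem.List.sorted xs (fun p => p.1) false).Pairwise (fun a b => a.1 ≠ b.1) := by
    have := List.pairwise_map.mp hmapnd
    exact this
  have hlt : (PySem.List.sorted xs (fun p => p.1) false).Pairwise (fun a b => a.1 < b.1) :=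
    (hle.and hne).imp (fun hab => lt_of_le_of_ne hab.1 hab.2)
  exact (PySem.List.sorted_eq_of_perm_of_pairwise_lt ys _ _ (hzperm.trans hperm) hlt).symm

-- ---------- the two step-1 range lists sort to the same list ----------

def dictA (names : List String) (repeated_names : List String) (untagged : List Int) :
    PySem.Dict String (Int × Int) :=
  repeated_names.foldl (stepA names untagged) PySem.Dict.empty

def dictB (names : List String) (repeated_names : List String) (untagged : List Int) :
    PySem.Dict String (Int × Int × Int) :=
  (PySem.List.enumerate names).foldl (stepB repeated_names untagged) PySem.Dict.empty

def listB (names : List String) (repeated_names : List String) (untagged : List Int) :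
    List (Int × Int) :=
  ((dictB names repeated_names untagged).values.filter (fun v => 2 ≤ v.2.2)).map
    (fun v => (v.1, v.2.1))

lemma mem_keysA {names repeated_names : List String} {untagged : List Int} {t : String} :
    t ∈ (dictA names repeated_names untagged).keys ↔
      t ∈ repeated_names ∧ 2 ≤ (posOf names untagged t).length := by
  have h := A_fold_get? names untagged repeated_names PySem.Dict.empty t
  rw [show repeated_names.foldl (stepA names untagged) PySem.Dict.empty
      = dictA names repeated_names untagged from rfl] at h
  constructor
  · intro hmem
    by_contra hc
    rw [if_neg hc, PySem.Dict.get?_empty] at h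
    exact (PySem.Dict.get?_eq_none_iff_not_mem_keys _ _).mp h hmem
  · intro hc
    rw [if_pos hc] at h
    by_contra hmem
    rw [(PySem.Dict.get?_eq_none_iff_not_mem_keys _ _).mpr hmem] at h
    simp at h

lemma nodup_keysA (names repeated_names : List String) (untagged : List Int) :
    (dictA names repeated_names untagged).keys.Nodup :=
  A_fold_nodup names untagged repeated_names PySem.Dict.empty PySem.Dict.nodup_keys_empty

lemma getD_dictA {names repeated_names : List String} {untagged : List Int} {t : String}
    (hmem : t ∈ (dictA names repeated_names untagged).keys) :
    (dictA names repeated_names untagged).getD t (0, 0) = gpA names untagged t := by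
  have h := A_fold_get? names untagged repeated_names PySem.Dict.empty t
  rw [show repeated_names.foldl (stepA names untagged) PySem.Dict.empty
      = dictA names repeated_names untagged from rfl] at h
  rw [if_pos (mem_keysA.mp hmem)] at h
  rw [PySem.Dict.getD_eq_get?_getD, h]
  rfl

lemma valuesA_eq (names repeated_names : List String) (untagged : List Int) :
    (dictA names repeated_names untagged).values
      = (dictA names repeated_names untagged).keys.map (gpA names untagged) := by
  rw [PySem.Dict.values_eq_map_keys _ (nodup_keysA names repeated_names untagged) (0, 0)]
  exact List.map_congr_left (fun k hk => getD_dictA hk)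

lemma nodup_keysB (names repeated_names : List String) (untagged : List Int) :
    (dictB names repeated_names untagged).keys.Nodup :=
  B_fold_nodup repeated_names untagged _ PySem.Dict.empty PySem.Dict.nodup_keys_empty

lemma mem_keysB {names repeated_names : List String} {untagged : List Int} {t : String} :
    t ∈ (dictB names repeated_names untagged).keys ↔
      t ∈ repeated_names ∧ posOf names untagged t ≠ [] := by
  have h := B_fold_get? repeated_names untagged t (PySem.List.enumerate names)
  rw [show (PySem.List.enumerate names).foldl (stepB repeated_names untagged) PySem.Dict.empty
      = dictB names repeated_names untagged from rfl] at h
  by_cases hrep : repeated_names.contains t = true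
  · rw [occB_enumerate names repeated_names untagged t hrep] at h
    have hrep' : t ∈ repeated_names := by simpa using hrep
    constructor
    · intro hmem
      refine ⟨hrep', ?_⟩
      intro hnil
      rw [if_pos hnil] at h
      exact (PySem.Dict.get?_eq_none_iff_not_mem_keys _ _).mp h hmem
    · intro ⟨_, hnil⟩
      rw [if_neg hnil] at h
      by_contra hmem
      rw [(PySem.Dict.get?_eq_none_iff_not_mem_keys _ _).mpr hmem] at h
      simp at h
  · rw [occB_of_not_rep names repeated_names untagged t
        (Bool.eq_false_iff.mpr hrep), if_pos rfl] at h
    have hrep' : t ∉ repeated_names := by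
      intro hm
      exact hrep (by simpa using hm)
    constructor
    · intro hmem
      exact absurd ((PySem.Dict.get?_eq_none_iff_not_mem_keys _ _).mp h hmem) (fun _ => by trivial)
    · intro ⟨hm, _⟩
      exact absurd hm hrep'

lemma getD_dictB {names repeated_names : List String} {untagged : List Int} {t : String}
    (hmem : t ∈ (dictB names repeated_names untagged).keys) :
    (dictB names repeated_names untagged).getD t (0, 0, 0)
      = ((posOf names untagged t).headD 0, (posOf names untagged t).getLastD 0,
         ((posOf names untagged t).length : Int)) := by
  obtain ⟨hrep', hnil⟩ := mem_keysB.mp hmem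
  have hrep : repeated_names.contains t = true := by simpa using hrep'
  have h := B_fold_get? repeated_names untagged t (PySem.List.enumerate names)
  rw [show (PySem.List.enumerate names).foldl (stepB repeated_names untagged) PySem.Dict.empty
      = dictB names repeated_names untagged from rfl,
      occB_enumerate names repeated_names untagged t hrep, if_neg hnil] at h
  rw [PySem.Dict.getD_eq_get?_getD, h]
  rfl

/-- the first component A stores for a qualifying name is one of its positions -/
lemma gpA_fst_mem {names : List String} {untagged : List Int} {t : String}
    (hnil : posOf names untagged t ≠ []) :
    (gpA names untagged t).1 ∈ posOf names untagged t := by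
  rcases hmin : PySem.List.min? (posOf names untagged t) (fun x => x) with _ | m
  · rw [PySem.List.min?_eq_none_iff] at hmin
    exact absurd hmin hnil
  · have := PySem.List.min?_mem hmin
    simpa [gpA, hmin] using this

lemma keysA_map_fst_nodup (names repeated_names : List String) (untagged : List Int) :
    (((dictA names repeated_names untagged).keys.map (gpA names untagged)).map Prod.fst).Nodup := by
  rw [List.map_map]
  apply List.Nodup.map_on _ (nodup_keysA names repeated_names untagged)
  intro t ht u hu heq
  simp only [Function.comp_apply] at heq
  have htn : posOf names untagged t ≠ [] := by
    have := (mem_keysA.mp ht).2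
    intro h0
    rw [h0] at this
    simp at this
  have hun : posOf names untagged u ≠ [] := by
    have := (mem_keysA.mp hu).2
    intro h0
    rw [h0] at this
    simp at this
  have h1 := mem_posOf (gpA_fst_mem htn)
  have h2 := mem_posOf (gpA_fst_mem hun)
  rw [heq] at h1
  rw [h1] at h2
  exact h2

lemma listB_eq (names repeated_names : List String) (untagged : List Int) :
    listB names repeated_names untagged
      = ((dictB names repeated_names untagged).keys.filter
          (fun t => decide (2 ≤ (posOf names untagged t).length))).map (gpA names untagged) := by
  rw [listB, PySem.Dict.values_eq_map_keys _ (nodup_keysB names repeated_names untagged) (0, 0, 0)]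
  rw [List.filter_map, List.map_map]
  have hfil : ((dictB names repeated_names untagged).keys.filter
        ((fun v : Int × Int × Int => decide (2 ≤ v.2.2)) ∘
          (fun k => (dictB names repeated_names untagged).getD k (0, 0, 0))))
      = ((dictB names repeated_names untagged).keys.filter
          (fun t => decide (2 ≤ (posOf names untagged t).length))) := by
    apply List.filter_congr
    intro t ht
    simp only [Function.comp_apply, getD_dictB ht]
    simp only [decide_eq_decide]
    exact_mod_cast Iff.rfl
  rw [hfil]
  apply List.map_congr_left
  intro t ht
  have ht' := List.mem_filter.mp ht
  have hmem := ht'.1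
  have hq : 2 ≤ (posOf names untagged t).length := by
    have := ht'.2
    simpa using this
  have hnil : posOf names untagged t ≠ [] := by
    intro h0
    rw [h0] at hq
    simp at hq
  simp only [Function.comp_apply, getD_dictB hmem]
  have hpw := posOf_pairwise names untagged t
  rw [gpA, min?_of_pairwise hpw hnil, max?_of_pairwise hpw hnil]

lemma sorted_ranges_eq (names repeated_names : List String) (untagged : List Int) :
    PySem.List.sorted2 (dictA names repeated_names untagged).values
        (fun p => p.1) (fun p => p.2) false
      = PySem.List.sorted2 (listB names repeated_names untagged)
        (fun p => p.1) (fun p => p.2) false := by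
  have hndA := keysA_map_fst_nodup names repeated_names untagged
  have hpermkeys : ((dictA names repeated_names untagged).keys).Perm
      ((dictB names repeated_names untagged).keys.filter
        (fun t => decide (2 ≤ (posOf names untagged t).length))) := by
    rw [List.perm_ext_iff_of_nodup (nodup_keysA names repeated_names untagged)
      ((nodup_keysB names repeated_names untagged).filter _)]
    intro t
    rw [List.mem_filter, mem_keysA, mem_keysB]
    constructor
    · intro ⟨h1, h2⟩
      refine ⟨⟨h1, ?_⟩, by simpa using h2⟩
      intro h0
      rw [h0] at h2
      simp at h2
    · intro ⟨⟨h1, _⟩, h2⟩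
      exact ⟨h1, by simpa using h2⟩
  have hperm : ((dictA names repeated_names untagged).values).Perm
      (listB names repeated_names untagged) := by
    rw [valuesA_eq, listB_eq]
    exact hpermkeys.map _
  have hndA' : ((dictA names repeated_names untagged).values.map Prod.fst).Nodup := by
    rw [valuesA_eq]
    exact hndA
  have hndB' : ((listB names repeated_names untagged).map Prod.fst).Nodup :=
    (hperm.map Prod.fst).nodup_iff.mp hndA'
  rw [sorted2_eq_sorted_fst _ hndA', sorted2_eq_sorted_fst _ hndB']
  exact sorted_fst_eq_of_perm _ _ hperm hndA'

-- ---------- the two range-merging loops agree ----------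

lemma merge_fold_eq :
    ∀ (tl m : List (Int × Int)) (cs ce : Int),
      tl.foldl (fun (acc : List (Int × Int)) p =>
          match acc.getLast? with
          | some q => if p.1 ≤ q.2 then acc.dropLast ++ [(q.1, max q.2 p.2)] else acc ++ [p]
          | none => [p]) (m ++ [(cs, ce)])
        = (tl.foldl (fun (st : List (Int × Int) × Int × Int) p =>
            if p.1 ≤ st.2.2 then (st.1, st.2.1, max st.2.2 p.2)
            else (st.1 ++ [(st.2.1, st.2.2)], p.1, p.2)) (m, cs, ce)).1
          ++ [((tl.foldl (fun (st : List (Int × Int) × Int × Int) p =>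
            if p.1 ≤ st.2.2 then (st.1, st.2.1, max st.2.2 p.2)
            else (st.1 ++ [(st.2.1, st.2.2)], p.1, p.2)) (m, cs, ce)).2.1,
            (tl.foldl (fun (st : List (Int × Int) × Int × Int) p =>
            if p.1 ≤ st.2.2 then (st.1, st.2.1, max st.2.2 p.2)
            else (st.1 ++ [(st.2.1, st.2.2)], p.1, p.2)) (m, cs, ce)).2.2)] := by
  intro tl
  induction tl with
  | nil => intro m cs ce; simp
  | cons p tl ih =>
    intro m cs ce
    simp only [List.foldl_cons, List.getLast?_concat, List.dropLast_concat]
    by_cases hp : p.1 ≤ ce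
    · simp only [if_pos hp]
      exact ih m cs (max ce p.2)
    · simp only [if_neg hp]
      rw [show m ++ [(cs, ce)] ++ [p] = (m ++ [(cs, ce)]) ++ [(p.1, p.2)] from by simp]
      exact ih (m ++ [(cs, ce)]) p.1 p.2

-- ---------- the two index collections agree ----------

lemma indices_eq (untagged : List Int) (s e : Int) :
    PySem.List.sorted ((PySem.Set.ofList untagged).filter
        (fun i => decide (s ≤ i) && decide (i ≤ e))) (fun x => x) false
      = (PySem.List.pyRange s (e + 1) 1).filter (fun i => untagged.contains i) := by
  have hpw : ((PySem.List.pyRange s (e + 1) 1).filter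
      (fun i => untagged.contains i)).Pairwise (· < ·) :=
    (PySem.List.pairwise_lt_pyRange_one s (e + 1)).filter _
  apply PySem.List.sorted_eq_of_perm_of_pairwise_lt
  · rw [List.perm_ext_iff_of_nodup (hpw.imp (fun h => ne_of_lt h))
      ((PySem.Set.nodup_ofList untagged).filter _)]
    intro i
    rw [List.mem_filter, List.mem_filter, PySem.List.mem_pyRange_one,
      PySem.Set.mem_ofList]
    constructor
    · intro ⟨⟨h1, h2⟩, h3⟩
      refine ⟨by simpa using h3, ?_⟩
      simp only [Bool.and_eq_true, decide_eq_true_eq]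
      omega
    · intro ⟨h1, h2⟩
      simp only [Bool.and_eq_true, decide_eq_true_eq] at h2
      refine ⟨⟨h2.1, by omega⟩, by simpa using h1⟩
  · exact hpw

-- ---------- the two common-prefix computations agree ----------

lemma headD_ofList (l : List String) (d : String) :
    (PySem.Set.ofList l).headD d = l.headD d := by
  cases l with
  | nil => rfl
  | cons x xs => rw [PySem.Set.ofList_cons]; rfl

lemma cpLoop_colsB (parts : List (List String)) (hne : parts ≠ []) (m : Int)
    (hmin : ∀ p ∈ parts, m ≤ (p.length : Int))
    (hatt : ∃ p ∈ parts, (p.length : Int) = m) :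
    ∀ (n : Nat) (j : Int) (common : List String), j = m - n → 0 ≤ j →
      cpLoopA parts (PySem.List.pyRange j m 1) common
        = common ++ cpColsB (colsB (parts.map (fun p => p.drop j.toNat))) := by
  obtain ⟨q, qs, rfl⟩ := List.exists_cons_of_ne_nil hne
  intro n
  induction n with
  | zero =>
    intro j common hj h0
    have hjm : j = m := by omega
    subst hjm
    rw [PySem.List.pyRange_one_eq_nil (le_refl j)]
    obtain ⟨p0, hp0, hlen⟩ := hatt
    have hdrop : p0.drop j.toNat = [] := by
      apply List.drop_eq_nil_of_le
      omega
    have hany : ((q.drop j.toNat :: qs.map (fun p => p.drop j.toNat)).any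
        (fun c => c.isEmpty)) = true := by
      rw [List.any_eq_true]
      refine ⟨p0.drop j.toNat, ?_, by simp [hdrop]⟩
      rw [show q.drop j.toNat :: qs.map (fun p => p.drop j.toNat)
          = ((q :: qs).map (fun p => p.drop j.toNat)) from rfl]
      exact List.mem_map_of_mem hp0
    rw [List.map_cons, colsB, if_pos hany]
    simp [cpLoopA, cpColsB]
  | succ n ih =>
    intro j common hj h0
    have hjm : j < m := by omega
    rw [PySem.List.pyRange_one_cons hjm]
    have hcols : ∀ p, p ∈ q :: qs → PySem.List.pyGetD p j ""
        = (p.drop j.toNat).headD "" := by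
      intro p hp
      rw [PySem.List.pyGetD_of_nonneg _ _ h0]
      have h1 : (p.drop j.toNat).headD "" = (p.drop j.toNat).head?.getD "" := by
        rw [List.headD_eq_head?_getD]
      rw [h1, List.head?_drop]
      rw [List.getD_eq_getElem?_getD]
    have hanyf : ((q.drop j.toNat :: qs.map (fun p => p.drop j.toNat)).any
        (fun c => c.isEmpty)) = false := by
      rw [List.any_eq_false]
      intro c hc
      rw [show q.drop j.toNat :: qs.map (fun p => p.drop j.toNat)
          = ((q :: qs).map (fun p => p.drop j.toNat)) from rfl] at hc
      obtain ⟨p, hp, rfl⟩ := List.mem_map.mp hc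
      have := hmin p hp
      simp only [List.isEmpty_iff, List.drop_eq_nil_iff]
      omega
    have hvals : (q :: qs).map (fun p => PySem.List.pyGetD p j "")
        = (q.drop j.toNat).headD "" :: qs.map (fun p => (p.drop j.toNat).headD "") := by
      rw [List.map_cons, hcols q (by simp)]
      congr 1
      exact List.map_congr_left (fun p hp => hcols p (by simp [hp]))
    rw [List.map_cons, colsB, if_neg (by rw [hanyf]; simp)]
    simp only [List.map_map, Function.comp_def]
    show (if (PySem.Set.ofList ((q :: qs).map (fun p => PySem.List.pyGetD p j ""))).length = 1
        then cpLoopA (q :: qs) (PySem.List.pyRange (j + 1) m 1)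
          (common ++ [(PySem.Set.ofList ((q :: qs).map (fun p => PySem.List.pyGetD p j ""))).headD ""])
        else common) = _
    rw [hvals]
    by_cases hone : (PySem.Set.ofList ((q.drop j.toNat).headD ""
        :: qs.map (fun p => (p.drop j.toNat).headD ""))).length = 1
    · rw [if_pos hone]
      rw [cpColsB, if_pos hone]
      have hjn : (j : Int) + 1 = m - n := by omega
      have h01 : (0 : Int) ≤ j + 1 := by omega
      have htn : (j + 1).toNat = j.toNat + 1 := by omega
      rw [headD_ofList]
      rw [ih (j + 1) (common ++ [((q.drop j.toNat).headD ""
        :: qs.map (fun p => (p.drop j.toNat).headD "")).headD ""]) hjn h01]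
      have htails : (List.drop j.toNat q).tail
            :: List.map (fun x => (List.drop j.toNat x).tail) qs
          = List.map (fun p => List.drop (j + 1).toNat p) (q :: qs) := by
        rw [htn, List.map_cons]
        congr 1
        · exact List.tail_drop
        · apply List.map_congr_left
          intro p _
          simp [List.tail_drop]
      rw [htails]
      simp
    · rw [if_neg hone, cpColsB, if_neg hone]
      simp

lemma prefix_eq (cn : List String) : commonPrefixMultiA cn = prefixB cn := by
  cases cn with
  | nil =>
    rw [commonPrefixMultiA, prefixB]
    simp only [List.map_nil, List.isEmpty_nil, if_true]
    rw [show colsB [] = [] from by rw [colsB]]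
    rfl
  | cons c cs =>
    rw [commonPrefixMultiA, prefixB, if_neg (by simp)]
    show PySem.Str.join "_" (cpLoopA ((c :: cs).map (fun nm => (PySem.Str.split? nm "_").getD []))
        (PySem.List.pyRange 0 ((PySem.List.min?
          (((c :: cs).map (fun nm => (PySem.Str.split? nm "_").getD [])).map
            (fun p => (p.length : Int))) (fun x => x)).getD 0) 1) []) = _
    rcases hmin : PySem.List.min? (((c :: cs).map (fun nm => (PySem.Str.split? nm "_").getD [])).map
        (fun p => (p.length : Int))) (fun x => x) with _ | m
    · rw [PySem.List.min?_eq_none_iff] at hmin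
      simp at hmin
    · have hisMin := PySem.List.min?_isMin hmin
      have hmem := PySem.List.min?_mem hmin
      obtain ⟨p0, hp0, hlen⟩ := List.mem_map.mp hmem
      have h0m : 0 ≤ m := by
        rw [← hlen]
        positivity
      have hmain := cpLoop_colsB ((c :: cs).map (fun nm => (PySem.Str.split? nm "_").getD []))
        (by simp) m (fun p hp => hisMin _ (List.mem_map_of_mem hp)) ⟨p0, hp0, hlen⟩
        m.toNat 0 [] (by omega) (by omega)
      rw [hmin]
      simp only [Option.getD_some]
      rw [hmain]
      rw [show List.map (fun p => List.drop (Int.toNat 0) p)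
            (List.map (fun nm => (PySem.Str.split? nm "_").getD []) (c :: cs))
          = List.map (fun nm => (PySem.Str.split? nm "_").getD []) (c :: cs) by simp]
      rfl

-- ---------- assembling the two programs ----------

lemma groupStep_eq (names : List String) (untagged : List Int) :
    groupStepB names untagged = groupStepA names untagged := by
  funext g r
  rw [groupStepA, groupStepB]
  simp only [indices_eq, ← prefix_eq]

def coreA (names : List String) (repeated_names : List String) (untagged : List Int) :
    List (String × List Int) :=
  if (dictA names repeated_names untagged).items.isEmpty then []
  else match PySem.List.sorted2 (dictA names repeated_names untagged).values
      (fun p => p.1) (fun p => p.2) false with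
  | [] => []
  | (cs, ce) :: tl =>
    let st := tl.foldl (fun (st : List (Int × Int) × Int × Int) p =>
      if p.1 ≤ st.2.2 then (st.1, st.2.1, max st.2.2 p.2)
      else (st.1 ++ [(st.2.1, st.2.2)], p.1, p.2)) ([], cs, ce)
    let merged := st.1 ++ [(st.2.1, st.2.2)]
    (merged.foldl (groupStepA names untagged) PySem.Dict.empty).items

def coreB (names : List String) (repeated_names : List String) (untagged : List Int) :
    List (String × List Int) :=
  let ranges := PySem.List.sorted2 (listB names repeated_names untagged)
      (fun p => p.1) (fun p => p.2) false
  let merged := ranges.foldl (fun (acc : List (Int × Int)) p =>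
      match acc.getLast? with
      | some q => if p.1 ≤ q.2 then acc.dropLast ++ [(q.1, max q.2 p.2)] else acc ++ [p]
      | none => [p]) []
  (merged.foldl (groupStepB names untagged) PySem.Dict.empty).items

lemma coreA_eq (names structs repeated_names : List String) (untagged : List Int) :
    find_message_groups_py names structs repeated_names untagged
      = coreA names repeated_names untagged := rfl

lemma coreB_eq (names structs repeated_names : List String) (untagged : List Int) :
    find_message_groups_py_alt names structs repeated_names untagged
      = coreB names repeated_names untagged := rfl

lemma core_eq (names repeated_names : List String) (untagged : List Int) :
    coreA names repeated_names untagged = coreB names repeated_names untagged := by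
  have hS := sorted_ranges_eq names repeated_names untagged
  by_cases hemp : (dictA names repeated_names untagged).items.isEmpty = true
  · have hitems : (dictA names repeated_names untagged).items = [] :=
      List.isEmpty_iff.mp hemp
    have hkeys : (dictA names repeated_names untagged).keys = [] := by
      have : (dictA names repeated_names untagged).keys
          = (dictA names repeated_names untagged).items.map Prod.fst := rfl
      rw [this, hitems]
      rfl
    have hlistB : listB names repeated_names untagged = [] := by
      rw [listB_eq]
      rw [List.map_eq_nil_iff, List.filter_eq_nil_iff]
      intro t htB hq
      have hq' : 2 ≤ (posOf names untagged t).length := by simpa using hq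
      have : t ∈ (dictA names repeated_names untagged).keys :=
        mem_keysA.mpr ⟨(mem_keysB.mp htB).1, hq'⟩
      rw [hkeys] at this
      simp at this
    rw [coreA, if_pos hemp, coreB, hlistB]
    rfl
  · have hvne : (dictA names repeated_names untagged).values ≠ [] := by
      intro h0
      have : (dictA names repeated_names untagged).items = [] := by
        have hv : (dictA names repeated_names untagged).values
            = (dictA names repeated_names untagged).items.map Prod.snd := rfl
        rw [hv] at h0
        exact List.map_eq_nil_iff.mp h0
      exact hemp (List.isEmpty_iff.mpr this)
    rcases hs0 : PySem.List.sorted2 (dictA names repeated_names untagged).values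
        (fun p => p.1) (fun p => p.2) false with _ | ⟨hd, tl⟩
    · have := PySem.List.sorted2_perm (dictA names repeated_names untagged).values
        (fun p : Int × Int => p.1) (fun p : Int × Int => p.2) false
      rw [hs0] at this
      exact absurd this.symm.eq_nil hvne
    · rw [coreA, if_neg hemp, hs0, coreB, ← hS, hs0]
      obtain ⟨cs, ce⟩ := hd
      simp only []
      rw [show ((cs, ce) :: tl).foldl (fun (acc : List (Int × Int)) p =>
          match acc.getLast? with
          | some q => if p.1 ≤ q.2 then acc.dropLast ++ [(q.1, max q.2 p.2)] else acc ++ [p]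
          | none => [p]) [] = tl.foldl (fun (acc : List (Int × Int)) p =>
          match acc.getLast? with
          | some q => if p.1 ≤ q.2 then acc.dropLast ++ [(q.1, max q.2 p.2)] else acc ++ [p]
          | none => [p]) ([] ++ [(cs, ce)]) from by rfl]
      rw [merge_fold_eq tl [] cs ce, groupStep_eq]

-- ===== VERDICT (by name: the statement is the Claim_ definition above) =====
theorem find_message_groups_py_spec : Claim_equal_find_message_groups_py := by
  intro names structs repeated_names untagged _
  unfold Spec_find_message_groups_py
  rw [coreA_eq names structs repeated_names untagged,
    coreB_eq names structs repeated_names untagged]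
  exact core_eq names repeated_names untagged
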